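-- pv_equiv track=rewrite | github.com/jolienvanhooff/lgtcallrhizaria | scripts/orthogroup_examinations.py | get_lowest_level_prokaryotes
-- ===== SOURCE A (Python) =====
-- import collections
--
-- def get_lowest_level_prokaryotes(sequences, taxonomy_dict):
--     clade = ""
--     rank = ""
--     all_taxonomies = []
--     for s in sequences:
--         all_taxonomies.extend(taxonomy_dict[s])
--     all_taxonomies_set = set(all_taxonomies)
--     hierarchy = collections.OrderedDict({'s__':'species', 'g__':'genus', 'f__':'family', 'o__':'order', 'c__':'class', 'p__':'phylum', 'd__':'domain'})
--     for h, j in hierarchy.items():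
--         hits = [x for x in all_taxonomies_set if h in x]
--         if len(hits) == 1:
--             r, clade = hits[0].split('__')
--             rank = hierarchy[f'{r}__']
--             return clade, rank
--     return clade, rank
-- ===== SOURCE B (Python) =====
-- def get_lowest_level_prokaryotes(sequences, taxonomy_dict):
--     hierarchy = {'s__': 'species', 'g__': 'genus', 'f__': 'family', 'o__': 'order',
--                  'c__': 'class', 'p__': 'phylum', 'd__': 'domain'}
--     # deduplicate the collected taxonomy strings (first-occurrence order)
--     seen = set()
--     distinct = []
--     for s in sequences:
--         for t in taxonomy_dict[s]:
--             if t in seen: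
--                 pass
--             else:
--                 seen.add(t)
--                 distinct.append(t)
--     # one pass over the distinct taxonomies: bucket each one under every
--     # rank prefix it contains
--     buckets = {h: [] for h in hierarchy}
--     for t in distinct:
--         for h in hierarchy:
--             if h in t:
--                 buckets[h].append(t)
--     # first rank (species -> domain) whose bucket holds a single clade wins
--     for h in hierarchy:
--         bucket = buckets[h]
--         if len(bucket) == 1:
--             r, clade = bucket[0].split('__')
--             return clade, hierarchy[r + '__']
--     return "", ""
-- ===== Notes on version B (the rewrite author's own statement) =====
-- stated objective: alternative
-- what changed: Instead of re-scanning the whole taxonomy set once per rank (7 filter passes), B deduplicates in first-occurrence order and makes a single pass over the distinct taxonomies that distributes each string into a bucket per rank prefix it contains, then walks the species-to-domain hierarchy reading bucket sizes.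
import Mathlib
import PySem

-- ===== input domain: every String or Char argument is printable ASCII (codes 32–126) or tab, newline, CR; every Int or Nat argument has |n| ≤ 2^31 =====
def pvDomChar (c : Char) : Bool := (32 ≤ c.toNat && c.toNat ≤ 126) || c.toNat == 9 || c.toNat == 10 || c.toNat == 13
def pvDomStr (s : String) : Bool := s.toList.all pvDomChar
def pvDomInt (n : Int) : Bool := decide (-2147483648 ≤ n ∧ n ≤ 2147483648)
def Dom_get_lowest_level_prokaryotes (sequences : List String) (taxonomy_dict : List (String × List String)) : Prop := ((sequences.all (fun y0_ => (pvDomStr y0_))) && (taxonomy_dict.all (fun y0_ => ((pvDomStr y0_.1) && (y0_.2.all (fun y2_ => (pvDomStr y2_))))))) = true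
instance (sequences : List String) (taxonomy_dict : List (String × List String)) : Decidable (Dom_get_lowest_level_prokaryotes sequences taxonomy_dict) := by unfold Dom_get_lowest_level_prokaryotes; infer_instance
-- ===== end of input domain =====

-- B replaces A's seven filter passes over the taxonomy set by one deduplication pass
-- plus one bucketing pass that files each taxonomy under every rank prefix it contains
-- (objective: alternative decomposition, same asymptotic cost).

-- ===== PORT A =====
def aHierarchy : PySem.Dict String String :=
  PySem.Dict.ofList [("s__", "species"), ("g__", "genus"), ("f__", "family"), ("o__", "order"),
                     ("c__", "class"), ("p__", "phylum"), ("d__", "domain")]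

-- 'for h, j in hierarchy.items(): …'.  The hits comprehension iterates the Python set,
-- whose hash order is not modelled; the branch uses only the length of hits and, when
-- it is 1, its unique element — both independent of that order, so filtering the
-- Set's element list is exact.
def aLoop (setL : List String) : List (String × String) → String × String
  | [] => ("", "")
  | (h, _j) :: rest =>
    let hits := setL.filter (fun x => PySem.Str.isIn h x)
    if hits.length = 1 then
      match PySem.Str.split? (hits.headD "") "__" with
      | some [r, clade] => (clade, aHierarchy.getD (r ++ "__") "")
      | _ => ("", "")   -- Python raises ValueError/KeyError here; excluded by Pre_
    else aLoop setL rest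

def get_lowest_level_prokaryotes (sequences : List String) (taxonomy_dict : List (String × List String)) : String × String :=
  -- taxonomy_dict[s] raises KeyError when s is missing; Pre_ excludes that, getD [] is the total form
  let all_taxonomies := sequences.foldl (fun acc s => acc ++ (PySem.Dict.mk taxonomy_dict).getD s []) []
  aLoop (PySem.Set.ofList all_taxonomies) aHierarchy.items

-- ===== PORT B =====
def bHierarchy : PySem.Dict String String :=
  PySem.Dict.ofList [("s__", "species"), ("g__", "genus"), ("f__", "family"), ("o__", "order"),
                     ("c__", "class"), ("p__", "phylum"), ("d__", "domain")]

-- 'for h in hierarchy' iterates the dict's keys, in insertion order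
def bPrefixes : List String := ["s__", "g__", "f__", "o__", "c__", "p__", "d__"]

-- body of B's dedup loop: 'if t in seen: pass else: seen.add(t); distinct.append(t)'
def bStep (st : PySem.Set String × List String) (t : String) : PySem.Set String × List String :=
  if PySem.Set.contains st.1 t then st else (PySem.Set.add st.1 t, st.2 ++ [t])

def bDedup (sequences : List String) (taxonomy_dict : List (String × List String)) : List String :=
  (sequences.foldl (fun st s => ((PySem.Dict.mk taxonomy_dict).getD s []).foldl bStep st)
    ((PySem.Set.empty : PySem.Set String), ([] : List String))).2

-- 'buckets = {h: [] for h in hierarchy}'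
def bBucketsInit : PySem.Dict String (List String) :=
  bPrefixes.foldl (fun d h => d.insert h []) PySem.Dict.empty

-- 'for t in distinct: for h in hierarchy: if h in t: buckets[h].append(t)'
def bBuckets (distinct : List String) : PySem.Dict String (List String) :=
  distinct.foldl
    (fun d t => bPrefixes.foldl
      (fun d' h => if PySem.Str.isIn h t then d'.modify h [] (· ++ [t]) else d') d)
    bBucketsInit

def bFind (buckets : PySem.Dict String (List String)) : List String → String × String
  | [] => ("", "")
  | h :: rest =>
    let bucket := buckets.getD h []
    if bucket.length = 1 then
      match PySem.Str.split? (bucket.headD "") "__" with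
      | some [r, clade] => (clade, bHierarchy.getD (r ++ "__") "")
      | _ => ("", "")
    else bFind buckets rest

def get_lowest_level_prokaryotes_alt (sequences : List String) (taxonomy_dict : List (String × List String)) : String × String :=
  bFind (bBuckets (bDedup sequences taxonomy_dict)) bPrefixes

-- ===== PRECONDITION & SPEC =====
-- a taxonomy string that matches some rank prefix must split on '__' into exactly a
-- known rank letter and a clade (otherwise Python's 2-unpacking / hierarchy lookup raises)
def pvGoodTax (t : String) : Bool :=
  !((["s__", "g__", "f__", "o__", "c__", "p__", "d__"] : List String).any (fun h => PySem.Str.isIn h t)) ||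
  (match PySem.Str.split? t "__" with
   | some [r, _] => decide (r ∈ (["s", "g", "f", "o", "c", "p", "d"] : List String))
   | _ => false)

-- Pre_ excludes inputs where Python A raises: a sequence id missing from taxonomy_dict
-- (KeyError) and collected taxonomy strings that match a rank prefix but do not split on
-- '__' into a known rank letter plus clade (ValueError/KeyError). The split condition is
-- required of every collected string, not only the one A happens to split — a slight,
-- stated over-approximation kept so Pre_ stays closed-form.
def Pre_get_lowest_level_prokaryotes (sequences : List String) (taxonomy_dict : List (String × List String)) : Prop :=
  (sequences.all (fun s => (PySem.Dict.mk taxonomy_dict).contains s &&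
     ((PySem.Dict.mk taxonomy_dict).getD s []).all pvGoodTax)) = true

instance (sequences : List String) (taxonomy_dict : List (String × List String)) : Decidable (Pre_get_lowest_level_prokaryotes sequences taxonomy_dict) := by unfold Pre_get_lowest_level_prokaryotes; infer_instance

def pvWitness_get_lowest_level_prokaryotes : List String × (List (String × List String)) :=
  (["m1", "m2"], [("m1", ["d__Bacteria", "p__Pseudomonadota"]), ("m2", ["d__Bacteria"])])

def Spec_get_lowest_level_prokaryotes (sequences : List String) (taxonomy_dict : List (String × List String)) (out : String × String) : Prop := out = get_lowest_level_prokaryotes_alt sequences taxonomy_dict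
instance (sequences : List String) (taxonomy_dict : List (String × List String)) (out : String × String) : Decidable (Spec_get_lowest_level_prokaryotes sequences taxonomy_dict out) := by unfold Spec_get_lowest_level_prokaryotes; infer_instance

-- ===== CLAIM (what is proved, stated in full; the proofs are below) =====
def Claim_equal_get_lowest_level_prokaryotes : Prop := ∀ (sequences : List String) (taxonomy_dict : List (String × List String)), Dom_get_lowest_level_prokaryotes sequences taxonomy_dict → Pre_get_lowest_level_prokaryotes sequences taxonomy_dict → Spec_get_lowest_level_prokaryotes sequences taxonomy_dict (get_lowest_level_prokaryotes sequences taxonomy_dict)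

-- ===== LEMMAS AND PROOFS =====

theorem pv_witness_ok :
    Dom_get_lowest_level_prokaryotes pvWitness_get_lowest_level_prokaryotes.1 pvWitness_get_lowest_level_prokaryotes.2 ∧
    Pre_get_lowest_level_prokaryotes pvWitness_get_lowest_level_prokaryotes.1 pvWitness_get_lowest_level_prokaryotes.2 := by
  constructor <;> decide

-- B's dedup loop keeps 'seen' and 'distinct' equal: folding bStep from a diagonal state
-- computes set.update on both components.
theorem bStep_foldl_diag (ts : List String) (s : PySem.Set String) :
    ts.foldl bStep (s, s) = (PySem.Set.update s ts, PySem.Set.update s ts) := by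
  induction ts generalizing s with
  | nil => simp [PySem.Set.update]
  | cons t ts ih =>
    have hstep : bStep (s, s) t = (PySem.Set.add s t, PySem.Set.add s t) := by
      unfold bStep
      by_cases hm : t ∈ s
      · rw [if_pos ((PySem.Set.contains_iff s t).mpr hm), PySem.Set.add_of_mem hm]
      · rw [if_neg (by simpa using (PySem.Set.contains_iff s t).not.mpr hm),
          PySem.Set.add_of_not_mem hm]
    rw [List.foldl_cons, hstep, ih, PySem.Set.update_cons]

theorem bDedup_outer (td : PySem.Dict String (List String)) (seqs : List String) (s : PySem.Set String) :
    seqs.foldl (fun st q => (td.getD q []).foldl bStep st) (s, s)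
      = (seqs.foldl (fun s q => PySem.Set.update s (td.getD q [])) s,
         seqs.foldl (fun s q => PySem.Set.update s (td.getD q [])) s) := by
  induction seqs generalizing s with
  | nil => rfl
  | cons q seqs ih => rw [List.foldl_cons, List.foldl_cons, bStep_foldl_diag, ih]

-- A concatenates then takes the set; that is the same fold of set.update.
theorem ofList_foldl_append (td : PySem.Dict String (List String)) (seqs : List String) (acc : List String) :
    PySem.Set.ofList (seqs.foldl (fun a q => a ++ td.getD q []) acc)
      = seqs.foldl (fun s q => PySem.Set.update s (td.getD q [])) (PySem.Set.ofList acc) := by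
  induction seqs generalizing acc with
  | nil => rfl
  | cons q seqs ih => rw [List.foldl_cons, List.foldl_cons, ih, PySem.Set.ofList_append]

theorem bDedup_eq (seqs : List String) (td : List (String × List String)) :
    bDedup seqs td
      = PySem.Set.ofList (seqs.foldl (fun acc s => acc ++ (PySem.Dict.mk td).getD s []) []) := by
  unfold bDedup
  have h0 : ((PySem.Set.empty : PySem.Set String), ([] : List String))
      = ((PySem.Set.empty : PySem.Set String), (PySem.Set.empty : PySem.Set String)) := rfl
  rw [h0, bDedup_outer, ofList_foldl_append]
  rfl

-- keys the bucketing inner loop never touches keep their value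
theorem inner_foldl_not_mem (t : String) (ks : List String) (h : String)
    (hnot : h ∉ ks) (d : PySem.Dict String (List String)) :
    (ks.foldl (fun d' h' => if PySem.Str.isIn h' t then d'.modify h' [] (· ++ [t]) else d') d).getD h []
      = d.getD h [] := by
  induction ks generalizing d with
  | nil => rfl
  | cons k ks ih =>
    rw [List.foldl_cons, ih (fun hm => hnot (List.mem_cons_of_mem _ hm))]
    split
    · exact PySem.Dict.getD_modify_of_ne _ _ _ (fun he => hnot (by simp [he]))
    · rfl

-- one element of the inner bucketing loop: key h gains t iff h is a prefix of t
theorem inner_foldl_mem (t : String) (ks : List String) (h : String)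
    (hnd : ks.Nodup) (hmem : h ∈ ks) (d : PySem.Dict String (List String)) :
    (ks.foldl (fun d' h' => if PySem.Str.isIn h' t then d'.modify h' [] (· ++ [t]) else d') d).getD h []
      = d.getD h [] ++ (if PySem.Str.isIn h t then [t] else []) := by
  induction ks generalizing d with
  | nil => cases hmem
  | cons k ks ih =>
    rw [List.foldl_cons]
    rcases List.mem_cons.mp hmem with he | hm
    · subst he
      have hnot : h ∉ ks := (List.nodup_cons.mp hnd).1
      rw [inner_foldl_not_mem t ks h hnot]
      split
      · rw [PySem.Dict.getD_modify_self]
      · simp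
    · have hne : h ≠ k := fun he => (List.nodup_cons.mp hnd).1 (he ▸ hm)
      have hd' : ∀ d' : PySem.Dict String (List String),
          (if PySem.Str.isIn k t then d'.modify k [] (· ++ [t]) else d').getD h [] = d'.getD h [] := by
        intro d'; split
        · exact PySem.Dict.getD_modify_of_ne _ _ _ hne
        · rfl
      rw [ih (List.nodup_cons.mp hnd).2 hm, hd']

theorem bBuckets_foldl (ts : List String) (h : String) (hmem : h ∈ bPrefixes)
    (d : PySem.Dict String (List String)) :
    (ts.foldl (fun d t => bPrefixes.foldl
        (fun d' h' => if PySem.Str.isIn h' t then d'.modify h' [] (· ++ [t]) else d') d) d).getD h []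
      = d.getD h [] ++ ts.filter (fun t => PySem.Str.isIn h t) := by
  induction ts generalizing d with
  | nil => simp
  | cons t ts ih =>
    rw [List.foldl_cons, ih, inner_foldl_mem t bPrefixes h (by decide) hmem, List.filter_cons]
    split <;> simp

theorem bBucketsInit_getD (h : String) : bBucketsInit.getD h [] = [] := by
  simp only [bBucketsInit, bPrefixes, List.foldl_cons, List.foldl_nil,
    PySem.Dict.getD_insert, PySem.Dict.getD_empty]
  split_ifs <;> rfl

theorem bBuckets_getD (ts : List String) (h : String) (hmem : h ∈ bPrefixes) :
    (bBuckets ts).getD h [] = ts.filter (fun t => PySem.Str.isIn h t) := by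
  unfold bBuckets
  rw [bBuckets_foldl ts h hmem, bBucketsInit_getD]
  rfl

theorem loop_eq (D : List String) : aLoop D aHierarchy.items = bFind (bBuckets D) bPrefixes := by
  have hH : bHierarchy = aHierarchy := rfl
  have hI : aHierarchy.items = [("s__", "species"), ("g__", "genus"), ("f__", "family"),
      ("o__", "order"), ("c__", "class"), ("p__", "phylum"), ("d__", "domain")] := rfl
  have h1 := bBuckets_getD D "s__" (by decide)
  have h2 := bBuckets_getD D "g__" (by decide)
  have h3 := bBuckets_getD D "f__" (by decide)
  have h4 := bBuckets_getD D "o__" (by decide)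
  have h5 := bBuckets_getD D "c__" (by decide)
  have h6 := bBuckets_getD D "p__" (by decide)
  have h7 := bBuckets_getD D "d__" (by decide)
  rw [hI]
  simp only [aLoop, bFind, bPrefixes, hH, h1, h2, h3, h4, h5, h6, h7]

-- ===== VERDICT (by name: the statement is the Claim_ definition above) =====
theorem get_lowest_level_prokaryotes_spec : Claim_equal_get_lowest_level_prokaryotes := by
  intro sequences taxonomy_dict _hdom _hpre
  unfold Spec_get_lowest_level_prokaryotes get_lowest_level_prokaryotes get_lowest_level_prokaryotes_alt
  rw [bDedup_eq, loop_eq]
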